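-- pv_equiv track=rewrite | github.com/fadlytanjung/coding-interview-js | python/minSubstitution.py | minSubstitutions
-- ===== SOURCE A (Python) =====
-- def minSubstitutions(s):
--     substitutions = 0
--     char = ""
--
--     for ch in s:
--         if ch != char:
--             char = ch  # Update char to the current character
--         else:
--             substitutions += 1  # Count a substitution
--             char = ""  # Reset char to avoid counting duplicates
--
--     return substitutions
-- ===== SOURCE B (Python) =====
-- def minSubstitutions(s):
--     # Run-based: scan each maximal run of equal characters with an inner
--     # pointer and add floor(run_length / 2) for each run.
--     chars = list(s)
--     n = len(chars)
--     total = 0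
--     pos = 0
--     while pos < n:
--         i = pos + 1
--         while i < n and chars[i] == chars[pos]:
--             i += 1
--         total += (i - pos) // 2
--         pos = i
--     return total
-- ===== Notes on version B (the rewrite author's own statement) =====
-- stated objective: alternative
-- what changed: Replaces A's stateful sentinel scan (compare-to-last-seen with reset) by a two-pointer run decomposition: find each maximal run of equal characters and add floor(run_length/2).
import Mathlib
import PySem

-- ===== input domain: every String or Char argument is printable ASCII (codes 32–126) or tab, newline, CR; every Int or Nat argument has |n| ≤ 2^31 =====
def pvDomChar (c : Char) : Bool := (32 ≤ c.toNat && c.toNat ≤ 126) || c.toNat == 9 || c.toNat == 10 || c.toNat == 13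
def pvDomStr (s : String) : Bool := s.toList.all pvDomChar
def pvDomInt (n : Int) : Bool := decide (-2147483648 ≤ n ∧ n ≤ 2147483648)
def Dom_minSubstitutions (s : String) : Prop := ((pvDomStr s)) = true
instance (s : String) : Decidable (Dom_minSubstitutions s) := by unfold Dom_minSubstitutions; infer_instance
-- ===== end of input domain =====

-- B replaces A's sentinel scan by a two-pointer maximal-run decomposition (alternative, same cost).

-- ===== PORT A =====
-- A's sentinel variable `char` is "" or a one-character string; ported as Option Char
-- (none = ""), exact because "" never equals a character of the string.
def pvAStep (st : Int × Option Char) (ch : Char) : Int × Option Char :=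
  if some ch ≠ st.2 then (st.1, some ch) else (st.1 + 1, none)

def minSubstitutions (s : String) : Int :=
  (s.toList.foldl pvAStep (0, none)).1

-- ===== PORT B =====
-- the inner while loop of Source B: how many leading characters equal c
def pvRunLen (c : Char) : List Char → Nat
  | [] => 0
  | d :: t => if d == c then pvRunLen c t + 1 else 0

-- the outer while loop of Source B: pos advancing = dropping the processed run
-- (fuel = initial length, a pure totality guard: each iteration consumes at least
-- one character, so the fuel branch is never reached; it only makes the recursion
-- structural so the kernel can evaluate it)
def pvAltGo : Nat → Int → List Char → Int
  | _, total, [] => total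
  | 0, total, _ :: _ => total
  | fuel + 1, total, c :: rest =>
      pvAltGo fuel (total + (((pvRunLen c rest + 1) / 2 : Nat) : Int)) (rest.drop (pvRunLen c rest))

def minSubstitutions_alt (s : String) : Int := pvAltGo s.toList.length 0 s.toList

-- ===== PRECONDITION & SPEC =====
def Spec_minSubstitutions (s : String) (out : Int) : Prop := out = minSubstitutions_alt s
instance (s : String) (out : Int) : Decidable (Spec_minSubstitutions s out) := by unfold Spec_minSubstitutions; infer_instance

-- ===== CLAIM (what is proved, stated in full; the proofs are below) =====
def Claim_equal_minSubstitutions : Prop := ∀ (s : String), Dom_minSubstitutions s → Spec_minSubstitutions s (minSubstitutions s)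

-- ===== LEMMAS AND PROOFS =====

-- A's scan over a run of j equal characters: counts j/2, ends holding c iff j is odd
theorem pv_repl (c : Char) : ∀ (j : Nat) (acc : Int),
    (List.replicate j c).foldl pvAStep (acc, none) =
      (acc + ((j / 2 : Nat) : Int), if j % 2 = 1 then some c else none) := by
  intro j
  induction j using Nat.strong_induction_on with
  | _ j ih =>
    match j with
    | 0 => intro acc; simp
    | 1 => intro acc; simp [pvAStep]  -- one-element run
    | (j + 2) =>
      intro acc
      have h1 : pvAStep (acc, none) c = (acc, some c) := by simp [pvAStep]
      have h2 : pvAStep (acc, some c) c = (acc + 1, none) := by simp [pvAStep]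
      rw [List.replicate_succ, List.replicate_succ, List.foldl_cons, h1, List.foldl_cons, h2,
        ih j (by omega) (acc + 1)]
      have hd : (j + 2) / 2 = j / 2 + 1 := by omega
      have hm : (j + 2) % 2 = j % 2 := by omega
      rw [hd, hm]
      simp only [Prod.mk.injEq]
      exact ⟨by push_cast; ring, trivial⟩

-- takeWhile (== c) is a run of pvRunLen copies of c
theorem pv_takeWhile (c : Char) : ∀ (l : List Char),
    l.takeWhile (· == c) = List.replicate (pvRunLen c l) c := by
  intro l
  induction l with
  | nil => simp [pvRunLen]
  | cons d t ih =>
    by_cases h : d = c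
    · subst h; simp [pvRunLen, List.replicate_succ, ih]
    · simp [pvRunLen, h]

theorem pv_dropWhile (c : Char) : ∀ (l : List Char),
    l.dropWhile (· == c) = l.drop (pvRunLen c l) := by
  intro l
  induction l with
  | nil => simp [pvRunLen]
  | cons d t ih =>
    by_cases h : d = c
    · subst h; simp [pvRunLen, ih]
    · simp [pvRunLen, h]

theorem pv_dropWhile_head (c : Char) : ∀ (l : List Char) (d : Char) (t : List Char),
    l.dropWhile (· == c) = d :: t → d ≠ c := by
  intro l
  induction l with
  | nil => intro d t h; simp at h
  | cons e u ih =>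
    intro d t h
    by_cases he : e = c
    · subst he; rw [List.dropWhile_cons_of_pos (by simp)] at h; exact ih d t h
    · rw [List.dropWhile_cons_of_neg (by simp [he])] at h
      cases h; exact he

-- the main invariant: A's scan from a fresh sentinel equals B's run loop with accumulator
theorem pv_main : ∀ (fuel : Nat) (l : List Char) (acc : Int), l.length ≤ fuel →
    (l.foldl pvAStep (acc, none)).1 = pvAltGo fuel acc l := by
  intro fuel
  induction fuel with
  | zero =>
    intro l acc h
    have hl : l = [] := List.eq_nil_of_length_eq_zero (Nat.le_zero.mp h)
    subst hl; simp [pvAltGo]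
  | succ fuel ih =>
    intro l acc h
    match l with
    | [] => simp [pvAltGo]
    | c :: rest =>
      have hk : rest.takeWhile (· == c) = List.replicate (pvRunLen c rest) c := pv_takeWhile c rest
      have hd : rest.dropWhile (· == c) = rest.drop (pvRunLen c rest) := pv_dropWhile c rest
      have hsplit : c :: rest = List.replicate (pvRunLen c rest + 1) c ++ rest.drop (pvRunLen c rest) := by
        conv_lhs => rw [← List.takeWhile_append_dropWhile (p := (· == c)) (l := rest)]
        rw [hk, hd, List.replicate_succ]
        simp
      have hlen : (rest.drop (pvRunLen c rest)).length ≤ fuel := by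
        have := h
        simp only [List.length_cons] at this
        simp only [List.length_drop]
        omega
      have hrec := ih (rest.drop (pvRunLen c rest))
          (acc + (((pvRunLen c rest + 1) / 2 : Nat) : Int)) hlen
      conv_lhs => rw [hsplit]
      rw [List.foldl_append, pv_repl c (pvRunLen c rest + 1) acc]
      conv_rhs => rw [pvAltGo]
      rw [← hrec]
      by_cases hpar : (pvRunLen c rest + 1) % 2 = 1
      · rw [if_pos hpar]
        cases hrest : rest.drop (pvRunLen c rest) with
        | nil => rfl
        | cons d t =>
          have hdc : d ≠ c := pv_dropWhile_head c rest d t (by rw [hd, hrest])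
          have h1 : pvAStep (acc + (((pvRunLen c rest + 1) / 2 : Nat) : Int), some c) d
              = (acc + (((pvRunLen c rest + 1) / 2 : Nat) : Int), some d) := by
            simp [pvAStep, hdc]
          have h2 : pvAStep (acc + (((pvRunLen c rest + 1) / 2 : Nat) : Int), none) d
              = (acc + (((pvRunLen c rest + 1) / 2 : Nat) : Int), some d) := by
            simp [pvAStep]
          rw [List.foldl_cons, List.foldl_cons, h1, h2]
      · rw [if_neg hpar]

-- ===== VERDICT (by name: the statement is the Claim_ definition above) =====
theorem minSubstitutions_spec : Claim_equal_minSubstitutions := by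
  intro s _
  unfold Spec_minSubstitutions minSubstitutions minSubstitutions_alt
  exact pv_main s.toList.length s.toList 0 (le_refl _)
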